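-- pv_equiv track=rewrite | github.com/the-zebulan/CodeWars | Beta/remember.py | remember
-- ===== SOURCE A (Python) =====
-- from collections import defaultdict
--
-- def remember(string):
--     d = defaultdict(int)
--     result = []
--     for a in string:
--         d[a] += 1
--         if d[a] == 2:
--             result.append(a)
--     return result
-- ===== SOURCE B (Python) =====
-- from collections import defaultdict
--
-- def remember(string):
--     pos = defaultdict(list)
--     for i, c in enumerate(string):
--         pos[c].append(i)
--     pairs = sorted(((idxs[1], c) for c, idxs in pos.items() if len(idxs) >= 2),
--                    key=lambda p: p[0])
--     return [c for _, c in pairs]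
-- ===== Notes on version B (the rewrite author's own statement) =====
-- stated objective: alternative
-- what changed: Replaces A's single streaming pass with a running per-char counter dict by a two-phase build-index-then-sort decomposition: first group all occurrence indices per character in a dict, then emit each character with at least two occurrences keyed and sorted by its second-occurrence index.
import Mathlib
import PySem

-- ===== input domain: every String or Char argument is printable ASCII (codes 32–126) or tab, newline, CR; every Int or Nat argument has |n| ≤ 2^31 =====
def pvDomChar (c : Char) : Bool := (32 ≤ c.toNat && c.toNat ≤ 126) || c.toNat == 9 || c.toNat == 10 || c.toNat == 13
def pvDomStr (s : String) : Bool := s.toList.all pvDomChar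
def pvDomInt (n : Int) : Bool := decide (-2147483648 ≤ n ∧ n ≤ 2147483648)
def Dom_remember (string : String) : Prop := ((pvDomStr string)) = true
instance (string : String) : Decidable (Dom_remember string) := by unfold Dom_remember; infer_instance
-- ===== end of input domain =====

-- B replaces A's streaming counter pass by building a char → occurrence-indices dict once
-- and sorting the (second-occurrence-index, char) pairs; objective: alternative (same cost class).

-- ===== PORT A =====
def remember (string : String) : List String :=
  (string.toList.foldl
    (fun (st : PySem.Dict Char Int × List String) a =>
      let d := st.1.modify a 0 (· + 1)
      if d.getD a 0 == 2 then (d, st.2 ++ [String.ofList [a]]) else (d, st.2))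
    (PySem.Dict.empty, [])).2

-- ===== PORT B =====
-- idxs[1] is ported as pyGetD _ 1 0: the 'len(idxs) >= 2' filter guarantees the index is in range.
def remember_alt (string : String) : List String :=
  let pos := (PySem.List.enumerate string.toList 0).foldl
      (fun (d : PySem.Dict Char (List Int)) p => d.modify p.2 [] (· ++ [p.1])) PySem.Dict.empty
  let pairs := PySem.List.sorted
      ((pos.items.filter (fun q => decide (2 ≤ q.2.length))).map
        (fun q => (PySem.List.pyGetD q.2 1 0, q.1)))
      (fun p => p.1)
  pairs.map (fun p => String.ofList [p.2])

-- ===== PRECONDITION & SPEC =====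
def Spec_remember (string : String) (out : List String) : Prop := out = remember_alt string
instance (string : String) (out : List String) : Decidable (Spec_remember string out) := by unfold Spec_remember; infer_instance

-- ===== CLAIM (what is proved, stated in full; the proofs are below) =====
def Claim_equal_remember : Prop := ∀ (string : String), Dom_remember string → Spec_remember string (remember string)

-- ===== LEMMAS AND PROOFS =====

-- A's scan, abstracted: emit (index, char) at the positions where the char's running count reaches 2.
def pvGo (pre t : List Char) : List (Int × Char) :=
  match t with
  | [] => []
  | a :: t' => (if pre.count a = 1 then [((pre.length : Int), a)] else []) ++ pvGo (pre ++ [a]) t'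

-- occurrence indices of c in cs, enumerated from offset n
def pvOccG (n : Int) (cs : List Char) (c : Char) : List Int :=
  ((PySem.List.enumerate cs n).filter (fun p => p.2 == c)).map (·.1)

def pvOcc (cs : List Char) (c : Char) : List Int := pvOccG 0 cs c

-- second occurrence index (meaningful when cs.count c ≥ 2)
def pvSIdx (cs : List Char) (c : Char) : Int := PySem.List.pyGetD (pvOcc cs c) 1 0

theorem pvOccG_cons (n : Int) (a : Char) (t : List Char) (c : Char) :
    pvOccG n (a :: t) c = (if a = c then [n] else []) ++ pvOccG (n+1) t c := by
  simp only [pvOccG, PySem.List.enumerate_cons, List.filter_cons]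
  by_cases h : a = c <;> simp [h]

theorem pvOccG_append (n : Int) (u v : List Char) (c : Char) :
    pvOccG n (u ++ v) c = pvOccG n u c ++ pvOccG (n + u.length) v c := by
  simp [pvOccG, PySem.List.enumerate_append, List.filter_append]

theorem pvOccG_length (n : Int) (t : List Char) (c : Char) :
    (pvOccG n t c).length = t.count c := by
  induction t generalizing n with
  | nil => rfl
  | cons a t ih =>
    rw [pvOccG_cons]
    by_cases h : a = c <;> simp [h, ih]

theorem pvSIdx_emit (pre t : List Char) (a : Char) (h : pre.count a = 1) :
    pvSIdx (pre ++ a :: t) a = (pre.length : Int) := by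
  have hlen : (pvOccG 0 pre a).length = 1 := by rw [pvOccG_length]; exact h
  obtain ⟨i0, hi0⟩ : ∃ i0, pvOccG 0 pre a = [i0] := by
    cases e : pvOccG 0 pre a with
    | nil => rw [e] at hlen; simp at hlen
    | cons x l => rw [e] at hlen; simp at hlen; exact ⟨x, by simp [hlen]⟩
  have hsplit : pvOcc (pre ++ a :: t) a = [i0] ++ ((pre.length : Int) :: pvOccG ((pre.length : Int) + 1) t a) := by
    rw [pvOcc, pvOccG_append, hi0, pvOccG_cons]
    simp
  rw [pvSIdx, hsplit, PySem.List.pyGetD_ofNat']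
  rfl

theorem pvGo_fst_lb : ∀ (t pre : List Char) (x : Int × Char),
    x ∈ pvGo pre t → (pre.length : Int) ≤ x.1 := by
  intro t
  induction t with
  | nil => intro pre x hx; simp [pvGo] at hx
  | cons a t ih =>
    intro pre x hx
    rw [pvGo] at hx
    rcases List.mem_append.mp hx with h | h
    · split at h <;> simp at h
      rw [h]
    · have := ih (pre ++ [a]) x h
      simp at this; omega

theorem pvGo_pairwise : ∀ (t pre : List Char),
    (pvGo pre t).Pairwise (fun a b => a.1 < b.1) := by
  intro t
  induction t with
  | nil => intro pre; simp [pvGo]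
  | cons a t ih =>
    intro pre
    rw [pvGo]
    apply List.pairwise_append.mpr
    refine ⟨?_, ih _, ?_⟩
    · split <;> simp
    · intro x hx y hy
      have hlb := pvGo_fst_lb t (pre ++ [a]) y hy
      simp at hlb
      split at hx <;> simp at hx
      rw [hx]; omega

theorem pvGo_mem : ∀ (t pre : List Char) (x : Int × Char),
    x ∈ pvGo pre t ↔ x = (pvSIdx (pre ++ t) x.2, x.2) ∧ pre.count x.2 ≤ 1 ∧ 2 ≤ (pre ++ t).count x.2 := by
  intro t
  induction t with
  | nil =>
    intro pre x
    simp [pvGo]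
  | cons a t ih =>
    intro pre x
    rw [pvGo]
    have hassoc : (pre ++ [a]) ++ t = pre ++ a :: t := by simp
    constructor
    · intro hx
      rcases List.mem_append.mp hx with h | h
      · split at h
        case isTrue hc =>
          simp at h; subst h
          refine ⟨by rw [pvSIdx_emit pre t a hc], by simp [hc], ?_⟩
          simp [List.count_append, hc]; omega
        case isFalse => simp at h
      · obtain ⟨he, h1, h2⟩ := (ih (pre ++ [a]) x).mp h
        rw [hassoc] at he h2
        refine ⟨he, ?_, h2⟩
        simp [List.count_append] at h1 ⊢; omega
    · rintro ⟨he, h1, h2⟩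
      by_cases hxa : x.2 = a
      · rcases Nat.lt_or_ge (pre.count a) 1 with hc | hc
        · apply List.mem_append.mpr; right
          apply (ih (pre ++ [a]) x).mpr
          rw [hassoc]
          refine ⟨he, ?_, h2⟩
          simp [List.count_append, hxa]; omega
        · rcases Nat.lt_or_ge (pre.count a) 2 with hc2 | hc2
          · have hc1 : pre.count a = 1 := by omega
            apply List.mem_append.mpr; left
            rw [if_pos hc1]
            have hx' : x = ((pre.length : Int), a) := by
              rw [he, hxa, pvSIdx_emit pre t a hc1]
            simp [hx']
          · rw [hxa] at h1; omega
      · apply List.mem_append.mpr; right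
        apply (ih (pre ++ [a]) x).mpr
        rw [hassoc]
        refine ⟨he, ?_, h2⟩
        have hax : a ≠ x.2 := fun h => hxa h.symm
        simp [List.count_append, hax]
        exact h1

theorem pvA_fold : ∀ (t pre : List Char) (d : PySem.Dict Char Int) (acc : List String),
    (∀ c, d.getD c 0 = (pre.count c : Int)) →
    (t.foldl
      (fun (st : PySem.Dict Char Int × List String) a =>
        let d' := st.1.modify a 0 (· + 1)
        if d'.getD a 0 == 2 then (d', st.2 ++ [String.ofList [a]]) else (d', st.2))
      (d, acc)).2
    = acc ++ (pvGo pre t).map (fun p => String.ofList [p.2]) := by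
  intro t
  induction t with
  | nil => intro pre d acc _; simp [pvGo]
  | cons a t ih =>
    intro pre d acc hinv
    rw [List.foldl_cons, pvGo]
    have hda : (d.modify a 0 (· + 1)).getD a 0 = (pre.count a : Int) + 1 := by
      rw [PySem.Dict.getD_modify_self, hinv]
    have hinv' : ∀ c, (d.modify a 0 (· + 1)).getD c 0 = (((pre ++ [a]).count c : Nat) : Int) := by
      intro c
      rw [PySem.Dict.getD_modify, List.count_append]
      by_cases h : c = a
      · rw [if_pos h, hinv, h]; simp
      · rw [if_neg h, hinv]
        have h0 : List.count c [a] = 0 := by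
          simp only [List.count_singleton, beq_iff_eq]
          exact if_neg (fun hh => h (Eq.symm hh))
        rw [h0]; simp
    by_cases hc : pre.count a = 1
    · have hcond : ((d.modify a 0 (· + 1)).getD a 0 == 2) = true := by
        rw [hda, hc]; decide
      simp only [hcond, if_true, if_pos hc]
      rw [ih (pre ++ [a]) _ _ hinv']
      simp
    · have hcond : ((d.modify a 0 (· + 1)).getD a 0 == 2) = false := by
        rw [hda]
        simp only [beq_eq_false_iff_ne, ne_eq]
        intro hh
        apply hc
        have : (pre.count a : Int) = 1 := by omega
        exact_mod_cast this
      simp only [hcond, if_neg hc, Bool.false_eq_true, if_false]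
      rw [ih (pre ++ [a]) _ _ hinv']
      simp

theorem pvPos_getD (cs : List Char) (c : Char) :
    ((PySem.List.enumerate cs 0).foldl
      (fun (d : PySem.Dict Char (List Int)) p => d.modify p.2 [] (· ++ [p.1]))
      PySem.Dict.empty).getD c [] = pvOcc cs c := by
  have hswap : (PySem.List.enumerate cs 0).foldl
      (fun (d : PySem.Dict Char (List Int)) p => d.modify p.2 [] (· ++ [p.1])) PySem.Dict.empty
      = (((PySem.List.enumerate cs 0).map Prod.swap).foldl
      (fun (d : PySem.Dict Char (List Int)) p => d.modify p.1 [] (· ++ [p.2])) PySem.Dict.empty) := by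
    rw [List.foldl_map]; rfl
  rw [hswap, PySem.Dict.getD_foldl_modify_append]
  simp [pvOcc, pvOccG, List.filter_map, Function.comp_def]

theorem pvContains_fold : ∀ (l : List (Int × Char)) (d : PySem.Dict Char (List Int)) (c : Char),
    (l.foldl (fun d p => d.modify p.2 [] (· ++ [p.1])) d).contains c
      = (d.contains c || l.any (fun p => p.2 == c)) := by
  intro l
  induction l with
  | nil => simp
  | cons p l ih =>
    intro d c
    rw [List.foldl_cons, ih, PySem.Dict.contains_modify]
    simp [Bool.or_left_comm, Bool.or_assoc, BEq.comm]

theorem pvPos_contains (cs : List Char) (c : Char) :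
    ((PySem.List.enumerate cs 0).foldl
      (fun (d : PySem.Dict Char (List Int)) p => d.modify p.2 [] (· ++ [p.1]))
      PySem.Dict.empty).contains c = true ↔ c ∈ cs := by
  rw [pvContains_fold]
  have hmap : (PySem.List.enumerate cs 0).any (fun p => p.2 == c)
       = ((PySem.List.enumerate cs 0).map (·.2)).any (fun x => x == c) := by
    rw [List.any_map]; rfl
  simp [hmap, PySem.List.map_snd_enumerate]

theorem pvNodup_fold : ∀ (l : List (Int × Char)) (d : PySem.Dict Char (List Int)),
    d.keys.Nodup → (l.foldl (fun d p => d.modify p.2 [] (· ++ [p.1])) d).keys.Nodup := by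
  intro l
  induction l with
  | nil => intro d h; exact h
  | cons p l ih =>
    intro d h
    rw [List.foldl_cons]
    apply ih
    rw [PySem.Dict.keys_modify]
    exact PySem.Dict.nodup_keys_insert d _ _ h

theorem pvPos_items_mem (cs : List Char) (q : Char × List Int) :
    q ∈ ((PySem.List.enumerate cs 0).foldl
      (fun (d : PySem.Dict Char (List Int)) p => d.modify p.2 [] (· ++ [p.1]))
      PySem.Dict.empty).items ↔ q.1 ∈ cs ∧ q.2 = pvOcc cs q.1 := by
  have hnd := pvNodup_fold (PySem.List.enumerate cs 0) PySem.Dict.empty PySem.Dict.nodup_keys_empty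
  rw [← PySem.Dict.get?_eq_some_iff_mem_items _ _ _ hnd]
  constructor
  · intro hg
    have hc : _ := PySem.Dict.contains_eq_isSome_get?
      ((PySem.List.enumerate cs 0).foldl
        (fun (d : PySem.Dict Char (List Int)) p => d.modify p.2 [] (· ++ [p.1]))
        PySem.Dict.empty) q.1
    rw [hg] at hc
    refine ⟨(pvPos_contains cs q.1).mp (by rw [hc]; rfl), ?_⟩
    have := PySem.Dict.getD_of_get?_eq_some _ ([] : List Int) hg
    rw [← this, pvPos_getD]
  · rintro ⟨hmem, hv⟩
    have hc := (pvPos_contains cs q.1).mpr hmem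
    rw [PySem.Dict.contains_eq_isSome_get?] at hc
    cases hg : PySem.Dict.get? ((PySem.List.enumerate cs 0).foldl
        (fun (d : PySem.Dict Char (List Int)) p => d.modify p.2 [] (· ++ [p.1]))
        PySem.Dict.empty) q.1 with
    | none => rw [hg] at hc; simp at hc
    | some v =>
      have := PySem.Dict.getD_of_get?_eq_some _ ([] : List Int) hg
      rw [pvPos_getD] at this
      rw [hv, ← this]

-- ===== VERDICT (by name: the statement is the Claim_ definition above) =====
theorem remember_spec : Claim_equal_remember := by
  intro string _
  unfold Spec_remember
  have hA : remember string = (pvGo [] string.toList).map (fun p => String.ofList [p.2]) := by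
    rw [remember, pvA_fold string.toList [] PySem.Dict.empty []
      (by intro c; simp [PySem.Dict.getD_empty])]
    simp
  set cs := string.toList with hcs
  set pos := (PySem.List.enumerate cs 0).foldl
      (fun (d : PySem.Dict Char (List Int)) p => d.modify p.2 [] (· ++ [p.1])) PySem.Dict.empty with hpos
  set pairs := (pos.items.filter (fun q => decide (2 ≤ q.2.length))).map
        (fun q => (PySem.List.pyGetD q.2 1 0, q.1)) with hpairs
  have hPairsMem : ∀ x : Int × Char, x ∈ pairs ↔ x = (pvSIdx cs x.2, x.2) ∧ 2 ≤ cs.count x.2 := by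
    intro x
    rw [hpairs]
    simp only [List.mem_map, List.mem_filter, decide_eq_true_eq]
    constructor
    · rintro ⟨q, ⟨hq, hlen⟩, rfl⟩
      obtain ⟨hq1, hq2⟩ := (pvPos_items_mem cs q).mp hq
      rw [hq2] at hlen
      rw [pvOcc, pvOccG_length] at hlen
      exact ⟨by rw [hq2]; rfl, hlen⟩
    · rintro ⟨he, hcnt⟩
      refine ⟨(x.2, pvOcc cs x.2), ⟨(pvPos_items_mem cs _).mpr ⟨?_, rfl⟩, ?_⟩, ?_⟩
      · exact List.count_pos_iff.mp (Nat.lt_of_lt_of_le (by omega) hcnt)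
      · rw [pvOcc, pvOccG_length]; exact hcnt
      · rw [he]; rfl
  have hGoMem : ∀ x : Int × Char, x ∈ pvGo [] cs ↔ x = (pvSIdx cs x.2, x.2) ∧ 2 ≤ cs.count x.2 := by
    intro x
    rw [pvGo_mem cs [] x]
    simp
  have ndGo : (pvGo [] cs).Nodup :=
    (pvGo_pairwise cs []).imp (fun hlt he => by rw [he] at hlt; exact lt_irrefl _ hlt)
  have ndPairs : pairs.Nodup := by
    apply List.Nodup.of_map (fun p : Int × Char => p.2)
    rw [hpairs, List.map_map]
    have : ((fun p : Int × Char => p.2) ∘ fun q : Char × List Int => (PySem.List.pyGetD q.2 1 0, q.1))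
         = fun q : Char × List Int => q.1 := rfl
    rw [this]
    have hnd := pvNodup_fold (PySem.List.enumerate cs 0) PySem.Dict.empty PySem.Dict.nodup_keys_empty
    rw [PySem.Dict.keys] at hnd
    exact hnd.sublist (List.Sublist.map _ List.filter_sublist)
  have hPerm : (pvGo [] cs).Perm pairs :=
    (List.perm_ext_iff_of_nodup ndGo ndPairs).mpr (fun x => by rw [hGoMem x, hPairsMem x])
  have hSorted : PySem.List.sorted pairs (fun p => p.1) = pvGo [] cs :=
    PySem.List.sorted_eq_of_perm_of_pairwise_lt pairs (pvGo [] cs) (fun p => p.1) hPerm (pvGo_pairwise cs [])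
  simp only [remember_alt]
  rw [← hcs, ← hpos, ← hpairs, hSorted, hA]
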